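-- pv_equiv track=rewrite | github.com/Hong-Jun-Ho/Python | venv/Programmers/level2/Fine_square.py | solution
-- ===== SOURCE A (Python) =====
-- def solution(w, h):
--     def gcm(a, b):
--         gcm = 1
--         for k in range(2, min(a, b) + 1):
--             while (a % k == 0) and (b % k == 0):
--                 a = a // k
--                 b = b // k
--                 gcm = gcm * k
--                 continue
--         return gcm
--
--     gcm = gcm(w, h)
--     if gcm == 1:
--         answer = w * h - (w + h - 1)
--     else:
--         answer = w * h - (w + h - gcm)
--
--     return answer
-- ===== SOURCE B (Python) =====
-- def solution(w, h):
--     # Largest common divisor by downward search; then the closed form.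
--     g = 1
--     for d in range(min(w, h), 1, -1):
--         if w % d == 0 and h % d == 0:
--             g = d
--             break
--     return w * h - w - h + g
-- ===== Notes on version B (the rewrite author's own statement) =====
-- stated objective: alternative
-- what changed: Replaces A's upward trial-division factorization (accumulating a product of shared prime factors k = 2..min) with a single downward scan that returns the first d in min(w,h)..2 dividing both, i.e. the greatest common divisor directly, then the same closed form w*h - w - h + g.
import Mathlib
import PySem

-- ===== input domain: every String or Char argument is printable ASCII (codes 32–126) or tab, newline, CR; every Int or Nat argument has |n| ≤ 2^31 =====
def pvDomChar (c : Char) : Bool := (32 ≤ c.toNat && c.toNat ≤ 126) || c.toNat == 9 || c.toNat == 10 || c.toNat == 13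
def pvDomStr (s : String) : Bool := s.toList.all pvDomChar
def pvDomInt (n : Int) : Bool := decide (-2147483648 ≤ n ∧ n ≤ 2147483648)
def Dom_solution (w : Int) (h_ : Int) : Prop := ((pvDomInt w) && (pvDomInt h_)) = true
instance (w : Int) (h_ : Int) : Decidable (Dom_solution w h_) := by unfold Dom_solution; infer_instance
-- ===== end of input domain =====

-- B replaces A's upward trial-division factorization with a single downward search for the greatest common divisor (alternative algorithm, same closed-form answer).

-- ===== PORT A =====
-- inner `while (a % k == 0) and (b % k == 0): a //= k; b //= k; gcm *= k`;
-- the fuel only makes the recursion total: in every iteration actually taken (k ≥ 2, a a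
-- positive multiple of k) a shrinks strictly, so fuel a.natAbs + 1 never runs out.
def pvWhileDiv (fuel : Nat) (k : Int) (a : Int) (b : Int) (g : Int) : Int × Int × Int :=
  match fuel with
  | 0 => (a, b, g)
  | f + 1 =>
    if PySem.Int.mod a k == 0 && PySem.Int.mod b k == 0 then
      pvWhileDiv f k (PySem.Int.floordiv a k) (PySem.Int.floordiv b k) (g * k)
    else (a, b, g)

-- `for k in range(2, min(a, b) + 1): …` over the state (a, b, gcm); returns gcm
def pvGcm (a : Int) (b : Int) : Int :=
  ((PySem.List.pyRange 2 (min a b + 1) 1).foldl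
    (fun (s : Int × Int × Int) k => pvWhileDiv (s.1.natAbs + 1) k s.1 s.2.1 s.2.2)
    (a, b, 1)).2.2

def solution (w : Int) (h_ : Int) : Int :=
  let gcm := pvGcm w h_
  if gcm == 1 then w * h_ - (w + h_ - 1) else w * h_ - (w + h_ - gcm)

-- ===== PORT B =====
-- `g = 1; for d in range(min(w, h), 1, -1): if w % d == 0 and h % d == 0: g = d; break`
-- ported as find? over the countdown range with default 1 (first match = the break)
def solution_alt (w : Int) (h_ : Int) : Int :=
  let g :=
    match (PySem.List.pyRange (min w h_) 1 (-1)).find?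
        (fun d => PySem.Int.mod w d == 0 && PySem.Int.mod h_ d == 0) with
    | some d => d
    | none => 1
  w * h_ - w - h_ + g

-- ===== PRECONDITION & SPEC =====
def Spec_solution (w : Int) (h_ : Int) (out : Int) : Prop := out = solution_alt w h_
instance (w : Int) (h_ : Int) (out : Int) : Decidable (Spec_solution w h_ out) := by unfold Spec_solution; infer_instance

-- ===== CLAIM (what is proved, stated in full; the proofs are below) =====
def Claim_equal_solution : Prop := ∀ (w : Int) (h_ : Int), Dom_solution w h_ → Spec_solution w h_ (solution w h_)

-- ===== LEMMAS AND PROOFS =====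

-- The inner while loop divides the largest common power of k out of a and b and multiplies it into g.
theorem pvWhileDiv_spec (fuel : Nat) (k a b g : Int) (hk : 2 ≤ k) (ha : 0 < a) (hb : 0 < b)
    (hf : a.natAbs < fuel) :
    ∃ m : Nat, pvWhileDiv fuel k a b g =
        (a / k ^ m, b / k ^ m, g * k ^ m) ∧ (k ^ m ∣ a) ∧ (k ^ m ∣ b) ∧
        ¬ (k ∣ a / k ^ m ∧ k ∣ b / k ^ m) := by
  induction fuel generalizing a b g with
  | zero => omega
  | succ f ih =>
    rw [pvWhileDiv]
    by_cases hcond : (PySem.Int.mod a k == 0 && PySem.Int.mod b k == 0) = true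
    · simp only [hcond, if_true]
      simp only [Bool.and_eq_true, beq_iff_eq] at hcond
      have hka : k ∣ a := (PySem.Int.mod_eq_zero_iff_dvd a k).mp hcond.1
      have hkb : k ∣ b := (PySem.Int.mod_eq_zero_iff_dvd b k).mp hcond.2
      have hkpos : (0:Int) < k := by omega
      have hfa : PySem.Int.floordiv a k = a / k := PySem.Int.floordiv_eq_ediv_of_pos hkpos
      have hfb : PySem.Int.floordiv b k = b / k := PySem.Int.floordiv_eq_ediv_of_pos hkpos
      have haeq : k * (a / k) = a := Int.mul_ediv_cancel' hka
      have hbeq : k * (b / k) = b := Int.mul_ediv_cancel' hkb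
      have ha' : 0 < a / k := by nlinarith [haeq]
      have hb' : 0 < b / k := by nlinarith [hbeq]
      have halt : a / k < a := by nlinarith [haeq]
      have hf' : (a / k).natAbs < f := by omega
      obtain ⟨m, heq, hma, hmb, hnd⟩ := ih (a / k) (b / k) (g * k) ha' hb' hf'
      have e1 : a / k / k ^ m = a / k ^ (m + 1) := by
        rw [Int.ediv_ediv_of_nonneg (le_of_lt hkpos), pow_succ']
      have e2 : b / k / k ^ m = b / k ^ (m + 1) := by
        rw [Int.ediv_ediv_of_nonneg (le_of_lt hkpos), pow_succ']
      refine ⟨m + 1, ?_, ?_, ?_, ?_⟩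
      · rw [hfa, hfb, heq, e1, e2]
        simp only [Prod.mk.injEq]
        exact ⟨trivial, trivial, by rw [pow_succ']; ring⟩
      · rw [pow_succ']; rw [← haeq]; exact mul_dvd_mul_left k hma
      · rw [pow_succ']; rw [← hbeq]; exact mul_dvd_mul_left k hmb
      · rw [← e1, ← e2]; exact hnd
    · simp only [hcond, if_false]
      simp only [Bool.and_eq_true, beq_iff_eq] at hcond
      push_neg at hcond
      refine ⟨0, by simp, by simp, by simp, ?_⟩
      simp only [pow_zero, Int.ediv_one]
      rintro ⟨h1, h2⟩
      exact hcond ((PySem.Int.mod_eq_zero_iff_dvd a k).mpr h1) ((PySem.Int.mod_eq_zero_iff_dvd b k).mpr h2)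

-- Invariant of the outer for-loop after processing k = 2 .. K-1.
def pvInv (a b K : Int) (s : Int × Int × Int) : Prop :=
  0 < s.1 ∧ 0 < s.2.1 ∧ 0 < s.2.2 ∧ s.1 * s.2.2 = a ∧ s.2.1 * s.2.2 = b ∧
    ∀ j : Int, 2 ≤ j → j < K → ¬ (j ∣ s.1 ∧ j ∣ s.2.1)

theorem pvFold_inv (a b : Int) (ha : 0 < a) (hb : 0 < b) (n : Nat) :
    pvInv a b (2 + n) (((PySem.List.pyRange 2 (2 + (n:Int)) 1).foldl
      (fun (s : Int × Int × Int) k => pvWhileDiv (s.1.natAbs + 1) k s.1 s.2.1 s.2.2)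
      (a, b, 1))) := by
  induction n with
  | zero =>
    rw [PySem.List.pyRange_one_eq_nil (by omega)]
    refine ⟨ha, hb, by norm_num, by simp, by simp, ?_⟩
    intro j hj hjK; omega
  | succ n ih =>
    have hsplit : PySem.List.pyRange 2 (2 + ((n:Int) + 1)) 1 =
        PySem.List.pyRange 2 (2 + (n:Int)) 1 ++ [2 + (n:Int)] := by
      have := PySem.List.pyRange_one_succ_right (show (2:Int) ≤ 2 + (n:Int) by omega)
      convert this using 2 <;> omega
    push_cast
    rw [hsplit, List.foldl_append, List.foldl_cons, List.foldl_nil]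
    set s := ((PySem.List.pyRange 2 (2 + (n:Int)) 1).foldl
      (fun (s : Int × Int × Int) k => pvWhileDiv (s.1.natAbs + 1) k s.1 s.2.1 s.2.2)
      (a, b, 1)) with hs
    obtain ⟨h1, h2, h3, h4, h5, h6⟩ := ih
    obtain ⟨m, heq, hma, hmb, hnd⟩ := pvWhileDiv_spec (s.1.natAbs + 1) (2 + (n:Int))
      s.1 s.2.1 s.2.2 (by omega) h1 h2 (by omega)
    rw [heq]
    have hKpos : (0:Int) < (2 + (n:Int)) ^ m := by positivity
    have hdvd1 : s.1 / (2 + (n:Int)) ^ m * (2 + (n:Int)) ^ m = s.1 := Int.ediv_mul_cancel hma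
    have hdvd2 : s.2.1 / (2 + (n:Int)) ^ m * (2 + (n:Int)) ^ m = s.2.1 := Int.ediv_mul_cancel hmb
    refine ⟨by nlinarith [hdvd1, hKpos, h1], by nlinarith [hdvd2, hKpos, h2], mul_pos h3 hKpos, ?_, ?_, ?_⟩
    · simp only; rw [show s.2.2 * (2 + (n:Int)) ^ m = (2 + (n:Int)) ^ m * s.2.2 by ring, ← mul_assoc]
      rw [hdvd1]; exact h4
    · simp only; rw [show s.2.2 * (2 + (n:Int)) ^ m = (2 + (n:Int)) ^ m * s.2.2 by ring, ← mul_assoc]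
      rw [hdvd2]; exact h5
    · intro j hj hjK hjd
      rcases hjd with ⟨hj1, hj2⟩
      have d1 : (s.1 / (2 + (n:Int)) ^ m) ∣ s.1 := ⟨(2 + (n:Int)) ^ m, hdvd1.symm⟩
      have d2 : (s.2.1 / (2 + (n:Int)) ^ m) ∣ s.2.1 := ⟨(2 + (n:Int)) ^ m, hdvd2.symm⟩
      by_cases hcase : j < 2 + (n:Int)
      · exact h6 j hj hcase ⟨hj1.trans d1, hj2.trans d2⟩
      · have hjeq : j = 2 + (n:Int) := by omega
        exact hnd ⟨hjeq ▸ hj1, hjeq ▸ hj2⟩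

-- The trial-division loop computes the gcd for a, b ≥ 2.
theorem pvGcm_eq_gcd (a b : Int) (ha : 2 ≤ a) (hb : 2 ≤ b) :
    pvGcm a b = Int.gcd a b := by
  have hmin : min a b + 1 = 2 + ((min a b - 1).toNat : Int) := by omega
  have := pvFold_inv a b (by omega) (by omega) (min a b - 1).toNat
  unfold pvGcm
  rw [hmin]
  set s := ((PySem.List.pyRange 2 (2 + ((min a b - 1).toNat : Int)) 1).foldl
    (fun (s : Int × Int × Int) k => pvWhileDiv (s.1.natAbs + 1) k s.1 s.2.1 s.2.2)
    (a, b, 1)) with hs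
  obtain ⟨h1, h2, h3, h4, h5, h6⟩ := this
  have hcop : Int.gcd s.1 s.2.1 = 1 := by
    by_contra hne
    obtain ⟨p, hp, hpd⟩ := Nat.exists_prime_and_dvd hne
    have hpd1 : (p:Int) ∣ s.1 := dvd_trans (Int.natCast_dvd_natCast.mpr hpd) (Int.gcd_dvd_left _ _)
    have hpd2 : (p:Int) ∣ s.2.1 := dvd_trans (Int.natCast_dvd_natCast.mpr hpd) (Int.gcd_dvd_right _ _)
    have hp2 : 2 ≤ (p:Int) := by exact_mod_cast hp.two_le
    have hple1 : (p:Int) ≤ s.1 := Int.le_of_dvd h1 hpd1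
    have hsle : s.1 ≤ a := by nlinarith
    have hsle2 : s.2.1 ≤ b := by nlinarith
    have hple2 : (p:Int) ≤ s.2.1 := Int.le_of_dvd h2 hpd2
    exact h6 (p:Int) hp2 (by omega) ⟨hpd1, hpd2⟩
  have : Int.gcd a b = Int.gcd s.1 s.2.1 * s.2.2.natAbs := by
    rw [← h4, ← h5, Int.gcd_mul_right]
  rw [this, hcop, one_mul]
  omega

-- When either dimension is 1 the for-loop range is empty, so A's gcm is 1.
theorem pvGcm_min_lt_two (a b : Int) (h : min a b < 2) : pvGcm a b = 1 := by
  unfold pvGcm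
  rw [PySem.List.pyRange_one_eq_nil (by omega)]
  rfl

-- A d greater than the gcd divides neither pair; the gcd itself divides both.
theorem find_down_eq (w h_ : Int) (hw : 2 ≤ w) (hh : 2 ≤ h_) :
    (match (PySem.List.pyRange (min w h_) 1 (-1)).find?
        (fun d => PySem.Int.mod w d == 0 && PySem.Int.mod h_ d == 0) with
      | some d => d
      | none => 1) = (Int.gcd w h_ : Int) := by
  set G : Int := (Int.gcd w h_ : Int) with hG
  have hGw : G ∣ w := Int.gcd_dvd_left w h_
  have hGh : G ∣ h_ := Int.gcd_dvd_right w h_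
  have hG1 : 1 ≤ G := by
    have : Int.gcd w h_ ≠ 0 := by
      intro h0
      have := Int.gcd_eq_zero_iff.mp h0
      omega
    omega
  have hGle : G ≤ min w h_ := by
    have h1 : G ≤ w := Int.le_of_dvd (by omega) hGw
    have h2 : G ≤ h_ := Int.le_of_dvd (by omega) hGh
    omega
  have hbig : ∀ d : Int, G < d → d ≤ min w h_ →
      (PySem.Int.mod w d == 0 && PySem.Int.mod h_ d == 0) = false := by
    intro d hd1 hd2
    by_contra hcon
    have hcon' : (PySem.Int.mod w d == 0 && PySem.Int.mod h_ d == 0) = true := by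
      revert hcon; cases (PySem.Int.mod w d == 0 && PySem.Int.mod h_ d == 0) <;> simp
    simp only [Bool.and_eq_true, beq_iff_eq] at hcon'
    have hdw : d ∣ w := (PySem.Int.mod_eq_zero_iff_dvd w d).mp hcon'.1
    have hdh : d ∣ h_ := (PySem.Int.mod_eq_zero_iff_dvd h_ d).mp hcon'.2
    have : d ∣ G := Int.dvd_coe_gcd hdw hdh
    have := Int.le_of_dvd (by omega) this
    omega
  by_cases hG2 : 2 ≤ G
  · -- split the countdown at G: everything above G fails, G succeeds
    have hsplit : PySem.List.pyRange (min w h_) 1 (-1) =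
        (PySem.List.pyRange (G + 1) (min w h_ + 1) 1).reverse ++
          G :: (PySem.List.pyRange 2 G 1).reverse := by
      rw [PySem.List.pyRange_neg_one_eq_reverse]
      rw [show (1:Int) + 1 = 2 by ring]
      rw [PySem.List.pyRange_one_append 2 G (min w h_ + 1) (by omega) (by omega)]
      rw [PySem.List.pyRange_one_cons (show G < min w h_ + 1 by omega)]
      rw [List.reverse_append, List.reverse_cons]
      simp
    rw [hsplit, List.find?_append]
    have hnone : (PySem.List.pyRange (G + 1) (min w h_ + 1) 1).reverse.find?
        (fun d => PySem.Int.mod w d == 0 && PySem.Int.mod h_ d == 0) = none := by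
      rw [List.find?_eq_none]
      intro d hd
      rw [List.mem_reverse, PySem.List.mem_pyRange_one] at hd
      simp [hbig d (by omega) (by omega)]
    have hp : (fun d => PySem.Int.mod w d == 0 && PySem.Int.mod h_ d == 0) G = true := by
      simp only [Bool.and_eq_true, beq_iff_eq]
      exact ⟨(PySem.Int.mod_eq_zero_iff_dvd w G).mpr hGw,
             (PySem.Int.mod_eq_zero_iff_dvd h_ G).mpr hGh⟩
    rw [hnone, Option.none_or]
    simp only [List.find?_cons, hp]
  · -- gcd = 1: no d in (1, min] divides both, find? is none, default g = 1
    have hG1' : G = 1 := by omega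
    have hnone : (PySem.List.pyRange (min w h_) 1 (-1)).find?
        (fun d => PySem.Int.mod w d == 0 && PySem.Int.mod h_ d == 0) = none := by
      rw [List.find?_eq_none]
      intro d hd
      rw [PySem.List.mem_pyRange_neg_one] at hd
      simp [hbig d (by omega) (by omega)]
    rw [hnone, hG1']

-- ===== VERDICT (by name: the statement is the Claim_ definition above) =====
theorem solution_spec : Claim_equal_solution := by
  unfold Claim_equal_solution
  intro w h_ _
  unfold Spec_solution solution solution_alt
  by_cases h2 : 2 ≤ min w h_
  · have hA : pvGcm w h_ = Int.gcd w h_ := pvGcm_eq_gcd w h_ (by omega) (by omega)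
    have hB := find_down_eq w h_ (by omega) (by omega)
    rw [hA]
    simp only [hB]
    rcases eq_or_ne ((Int.gcd w h_ : Int)) 1 with hg | hg
    · rw [if_pos (by simpa using hg), hg]; ring
    · rw [if_neg (by simpa using hg)]; ring
  · have hA : pvGcm w h_ = 1 := pvGcm_min_lt_two w h_ (by omega)
    rw [hA, PySem.List.pyRange_neg_one_eq_nil (by omega)]
    simp only [List.find?_nil]
    norm_num
    ring
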